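-- pv_equiv track=rewrite | github.com/jonathanwilsonami/OR568_ML_Project | data_pipeline/swim_data_pipeline/swim_ml_pipeline.py | _time_block
-- ===== SOURCE A (Python) =====
-- from typing import Optional
--
-- def _time_block(hour: Optional[int]) -> str:
--     """Map departure hour to FAA time block label."""
--     if hour is None:
--         return ""
--     blocks = [
--         (0,  6,  "0001-0559"),
--         (6,  7,  "0600-0659"),
--         (7,  8,  "0700-0759"),
--         (8,  9,  "0800-0859"),
--         (9,  10, "0900-0959"),
--         (10, 11, "1000-1059"),
--         (11, 12, "1100-1159"),
--         (12, 13, "1200-1259"),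
--         (13, 14, "1300-1359"),
--         (14, 15, "1400-1459"),
--         (15, 16, "1500-1559"),
--         (16, 17, "1600-1659"),
--         (17, 18, "1700-1759"),
--         (18, 19, "1800-1859"),
--         (19, 20, "1900-1959"),
--         (20, 21, "2000-2059"),
--         (21, 22, "2100-2159"),
--         (22, 23, "2200-2259"),
--         (23, 24, "2300-2359"),
--     ]
--     for start, end, label in blocks:
--         if start <= hour < end:
--             return label
--     return ""
-- ===== SOURCE B (Python) =====
-- from typing import Optional
--
-- def _time_block(hour: Optional[int]) -> str:
--     """Map departure hour to FAA time block label (closed form)."""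
--     if hour is None or not (0 <= hour < 24):
--         return ""
--     if hour < 6:
--         return "0001-0559"
--     return f"{hour:02d}00-{hour:02d}59"
-- ===== Notes on version B (the rewrite author's own statement) =====
-- stated objective: simpler
-- what changed: Replaced the 19-row table scan with range guards and one closed-form format expression for hours 6..23.
import Mathlib
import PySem

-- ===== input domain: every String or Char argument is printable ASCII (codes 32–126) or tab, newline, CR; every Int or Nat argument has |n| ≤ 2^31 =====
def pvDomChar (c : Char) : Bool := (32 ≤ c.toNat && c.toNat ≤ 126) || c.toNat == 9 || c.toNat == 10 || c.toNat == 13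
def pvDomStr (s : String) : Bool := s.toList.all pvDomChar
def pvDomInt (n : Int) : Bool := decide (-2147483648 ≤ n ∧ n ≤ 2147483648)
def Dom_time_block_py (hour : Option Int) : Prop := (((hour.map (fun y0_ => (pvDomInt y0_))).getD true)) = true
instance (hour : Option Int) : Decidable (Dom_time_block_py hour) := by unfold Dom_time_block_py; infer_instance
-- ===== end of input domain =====

-- ===== PORT A =====
-- Header: B computes the label by range guards and one closed-form format expression instead of scanning A's 19-row table (objective: simpler).
def pvBlocks : List (Int × Int × String) :=
  [(0, 6, "0001-0559"), (6, 7, "0600-0659"), (7, 8, "0700-0759"), (8, 9, "0800-0859"),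
   (9, 10, "0900-0959"), (10, 11, "1000-1059"), (11, 12, "1100-1159"), (12, 13, "1200-1259"),
   (13, 14, "1300-1359"), (14, 15, "1400-1459"), (15, 16, "1500-1559"), (16, 17, "1600-1659"),
   (17, 18, "1700-1759"), (18, 19, "1800-1859"), (19, 20, "1900-1959"), (20, 21, "2000-2059"),
   (21, 22, "2100-2159"), (22, 23, "2200-2259"), (23, 24, "2300-2359")]

-- the 'for … return label' loop: first matching row, else ""
def pvScan (bs : List (Int × Int × String)) (h : Int) : String :=
  match bs with
  | [] => ""
  | (s, e, l) :: rest => if s ≤ h ∧ h < e then l else pvScan rest h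

def time_block_py (hour : Option Int) : String :=
  match hour with
  | none => ""
  | some h => pvScan pvBlocks h

-- ===== PORT B =====
-- f"{hour:02d}" ported by hand: pad with "0" below 10 (exact for 0 ≤ hour < 100, the only range B formats)
def pvFmt02 (h : Int) : String := (if h < 10 then "0" else "") ++ PySem.Int.toStr h

def time_block_py_alt (hour : Option Int) : String :=
  match hour with
  | none => ""
  | some h =>
    if ¬ (0 ≤ h ∧ h < 24) then ""
    else if h < 6 then "0001-0559"
    else pvFmt02 h ++ "00-" ++ pvFmt02 h ++ "59"

-- ===== PRECONDITION & SPEC =====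
def Spec_time_block_py (hour : Option Int) (out : String) : Prop := out = time_block_py_alt hour
instance (hour : Option Int) (out : String) : Decidable (Spec_time_block_py hour out) := by unfold Spec_time_block_py; infer_instance

-- ===== CLAIM (what is proved, stated in full; the proofs are below) =====
def Claim_equal_time_block_py : Prop := ∀ (hour : Option Int), Dom_time_block_py hour → Spec_time_block_py hour (time_block_py hour)

-- ===== LEMMAS AND PROOFS =====

-- ===== VERDICT (by name: the statement is the Claim_ definition above) =====
theorem time_block_py_spec : Claim_equal_time_block_py := by
  intro hour _
  unfold Spec_time_block_py
  match hour with
  | none => rfl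
  | some h =>
    by_cases hr : 0 ≤ h ∧ h < 24
    · obtain ⟨h0, h1⟩ := hr
      interval_cases h <;> rfl
    · have hb : time_block_py_alt (some h) = "" := by
        simp only [time_block_py_alt, if_pos hr]
      rw [hb]
      show pvScan pvBlocks h = ""
      rw [pvBlocks]
      repeat rw [pvScan, if_neg (by omega)]
      rfl
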